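-- pv_equiv track=rewrite | github.com/bartosz-szymanski-dev/minify-images | main.py | inject_optimized_directory_into_path
-- ===== SOURCE A (Python) =====
-- def inject_optimized_directory_into_path(directory_name, file_path):
--     new_file_path_list = []
--     separator = "/"
--     should_inject = 0
--     for index, sub_path in enumerate(file_path.split(separator)):
--         if should_inject == 1:
--             new_file_path_list.append(directory_name)
--             should_inject = should_inject + 1
--         if sub_path == "images":
--             should_inject = should_inject + 1
--
--         new_file_path_list.append(sub_path)
--
--     return separator.join(new_file_path_list)
-- ===== SOURCE B (Python) =====
-- def inject_optimized_directory_into_path(directory_name, file_path):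
--     parts = file_path.split("/")
--     if "images" in parts:
--         i = parts.index("images")
--         if i + 1 < len(parts):
--             parts.insert(i + 1, directory_name)
--     return "/".join(parts)
-- ===== Notes on version B (the rewrite author's own statement) =====
-- stated objective: simpler
-- what changed: A's single pass with a stateful should_inject counter is replaced by a locate-then-splice decomposition: split, find the first 'images' segment with index, insert the directory after it unless it is the last segment, join.
import Mathlib
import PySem

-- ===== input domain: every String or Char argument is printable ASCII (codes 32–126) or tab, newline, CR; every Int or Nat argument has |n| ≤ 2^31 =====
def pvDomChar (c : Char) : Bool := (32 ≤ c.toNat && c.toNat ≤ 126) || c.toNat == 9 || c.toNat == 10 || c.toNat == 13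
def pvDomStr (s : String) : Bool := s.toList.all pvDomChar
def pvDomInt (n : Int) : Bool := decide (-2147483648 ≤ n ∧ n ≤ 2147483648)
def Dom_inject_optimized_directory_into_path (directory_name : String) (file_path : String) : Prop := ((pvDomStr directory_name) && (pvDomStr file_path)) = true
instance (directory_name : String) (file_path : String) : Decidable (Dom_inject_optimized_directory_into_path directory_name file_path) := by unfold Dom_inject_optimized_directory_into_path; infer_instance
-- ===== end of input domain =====

-- B replaces A's stateful should_inject counter loop with a locate-then-splice
-- decomposition (find the first 'images' segment, insert after it unless it is last); objective: simpler.

-- ===== PORT A =====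
-- for-loop → foldl over enumerate(split), state = (new_file_path_list, should_inject);
-- '.split("/")' → PySem.Str.split?, exact since the separator "/" is non-empty (getD [] is never used)
def inject_optimized_directory_into_path (directory_name : String) (file_path : String) : String :=
  let separator := "/"
  let r := (PySem.List.enumerate ((PySem.Str.split? file_path separator).getD [])).foldl
    (fun (st : List String × Int) (p : Int × String) =>
      let lst := if st.2 = 1 then st.1 ++ [directory_name] else st.1
      let s := if st.2 = 1 then st.2 + 1 else st.2
      let s := if p.2 = "images" then s + 1 else s
      (lst ++ [p.2], s)) ([], 0)
  PySem.Str.join separator r.1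

-- ===== PORT B =====
-- 'parts.index("images")' guarded by membership → PySem.List.index?; 'parts.insert(i+1, dn)' → PySem.List.insert
def inject_optimized_directory_into_path_alt (directory_name : String) (file_path : String) : String :=
  let parts := (PySem.Str.split? file_path "/").getD []
  let parts :=
    if "images" ∈ parts then
      match PySem.List.index? parts "images" with
      | some i => if i + 1 < parts.length then PySem.List.insert parts ((i : Int) + 1) directory_name else parts
      | none => parts
    else parts
  PySem.Str.join "/" parts

-- ===== PRECONDITION & SPEC =====
def Spec_inject_optimized_directory_into_path (directory_name : String) (file_path : String) (out : String) : Prop := out = inject_optimized_directory_into_path_alt directory_name file_path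
instance (directory_name : String) (file_path : String) (out : String) : Decidable (Spec_inject_optimized_directory_into_path directory_name file_path out) := by unfold Spec_inject_optimized_directory_into_path; infer_instance

-- ===== CLAIM (what is proved, stated in full; the proofs are below) =====
def Claim_equal_inject_optimized_directory_into_path : Prop := ∀ (directory_name : String) (file_path : String), Dom_inject_optimized_directory_into_path directory_name file_path → Spec_inject_optimized_directory_into_path directory_name file_path (inject_optimized_directory_into_path directory_name file_path)

-- ===== LEMMAS AND PROOFS =====

-- proof-side reformulation of A's loop: the list it emits, without the accumulator
def goA (dn : String) : Int → List String → List String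
  | _, [] => []
  | s, x :: xs =>
      (if s = 1 then [dn] else []) ++
        x :: goA dn ((if x = "images" then (if s = 1 then s + 1 else s) + 1 else (if s = 1 then s + 1 else s))) xs

theorem foldA_eq_goA (dn : String) (xs : List String) : ∀ (acc : List String) (s i : Int),
    ((PySem.List.enumerate xs i).foldl
      (fun (st : List String × Int) (p : Int × String) =>
        let lst := if st.2 = 1 then st.1 ++ [dn] else st.1
        let s := if st.2 = 1 then st.2 + 1 else st.2
        let s := if p.2 = "images" then s + 1 else s
        (lst ++ [p.2], s)) (acc, s)).1 = acc ++ goA dn s xs := by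
  induction xs with
  | nil => intro acc s i; simp [PySem.List.enumerate, goA]
  | cons x xs ih =>
      intro acc s i
      rw [PySem.List.enumerate_cons]
      simp only [List.foldl_cons]
      by_cases hs : s = 1
      · simp only [hs, if_true, goA, ih]; simp
      · simp only [hs, if_false, goA, ih]; simp

theorem goA_of_ge_two (dn : String) (xs : List String) : ∀ s : Int, 2 ≤ s → goA dn s xs = xs := by
  induction xs with
  | nil => intro s _; simp [goA]
  | cons x xs ih =>
      intro s hs
      have h1 : s ≠ 1 := by omega
      simp only [goA, h1, if_false, List.nil_append]
      split_ifs with hx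
      · rw [ih (s + 1) (by omega)]
      · rw [ih s hs]

theorem goA_zero (dn : String) (xs : List String) :
    goA dn 0 xs =
      match PySem.List.index? xs "images" with
      | none => xs
      | some i => if i + 1 < xs.length then xs.take (i + 1) ++ dn :: xs.drop (i + 1) else xs := by
  induction xs with
  | nil => simp [goA, PySem.List.index?]
  | cons x xs ih =>
      by_cases hx : x = "images"
      · subst hx
        rw [PySem.List.index?_cons_self]
        dsimp only
        cases xs with
        | nil => simp [goA]
        | cons y ys =>
            have h2 : goA dn (if y = "images" then (3:Int) else 2) ys = ys := by
              split_ifs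
              · exact goA_of_ge_two dn ys 3 (by omega)
              · exact goA_of_ge_two dn ys 2 (by omega)
            simp [goA, h2]
      · have hstep : goA dn 0 (x :: xs) = x :: goA dn 0 xs := by
          simp [goA, hx]
        rw [hstep, ih, PySem.List.index?_cons_of_ne xs hx]
        cases PySem.List.index? xs "images" with
        | none => rfl
        | some i =>
            rw [Option.map_some]
            dsimp only
            by_cases hl : i + 1 < xs.length
            · rw [if_pos hl, if_pos (by simp only [List.length_cons]; omega)]
              simp [List.take_succ_cons, List.drop_succ_cons]
            · rw [if_neg hl, if_neg (by simp only [List.length_cons]; omega)]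

theorem list_level (dn : String) (parts : List String) :
    ((PySem.List.enumerate parts).foldl
      (fun (st : List String × Int) (p : Int × String) =>
        let lst := if st.2 = 1 then st.1 ++ [dn] else st.1
        let s := if st.2 = 1 then st.2 + 1 else st.2
        let s := if p.2 = "images" then s + 1 else s
        (lst ++ [p.2], s)) ([], 0)).1 =
    (if "images" ∈ parts then
      match PySem.List.index? parts "images" with
      | some i => if i + 1 < parts.length then PySem.List.insert parts ((i : Int) + 1) dn else parts
      | none => parts
    else parts) := by
  rw [foldA_eq_goA dn parts [] 0 0, List.nil_append, goA_zero]
  by_cases hm : "images" ∈ parts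
  · rw [if_pos hm]
    cases PySem.List.index? parts "images" with
    | none => rfl
    | some i =>
        dsimp only
        by_cases hl : i + 1 < parts.length
        · rw [if_pos hl, if_pos hl,
            show ((i : Int) + 1) = ((i + 1 : Nat) : Int) by push_cast; ring,
            PySem.List.insert_natCast parts (i + 1) dn (by omega)]
        · rw [if_neg hl, if_neg hl]
  · rw [if_neg hm]
    rw [(PySem.List.index?_eq_none_iff parts "images").mpr hm]

-- ===== VERDICT (by name: the statement is the Claim_ definition above) =====
theorem inject_optimized_directory_into_path_spec : Claim_equal_inject_optimized_directory_into_path := by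
  intro dn fp _
  show _ = _
  unfold inject_optimized_directory_into_path inject_optimized_directory_into_path_alt
  exact congrArg (PySem.Str.join "/") (list_level dn ((PySem.Str.split? fp "/").getD []))
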